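-- pv_equiv track=rewrite | github.com/HuyaneMatsu/scarletio | scarletio/tools/asynchronous_interactive_console/editors/editor_advanced.py | _check_is_buffer_empty_after
-- ===== SOURCE A (Python) =====
-- EMPTY_CHARACTERS = frozenset((' ', '\t', '\n'))
--
-- def _check_is_line_empty(line):
--     """
--     Returns whether the given line is empty.
--
--     Parameters
--     ----------
--     line : `str`
--         The line to check out.
--
--     Returns
--     -------
--     is_empty : `bool`
--     """
--     for character in line:
--         if character not in EMPTY_CHARACTERS:
--             return False
--
--     return True
--
-- def _check_is_buffer_empty_after(buffer, index):
--     """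
--     Returns whether the buffer is empty after the given index. Excluding the `index`'s exact position.
--
--     Parameters
--     ----------
--     buffer : `list` of `str`
--         The buffer to check out.
--     index : `int`
--         The starting position.
--
--     Returns
--     -------
--     is_buffer_empty_after : `bool`
--     """
--     buffer_length = len(buffer)
--
--     index += 1
--
--     while index < buffer_length:
--         if not _check_is_line_empty(buffer[index]):
--             return False
--
--         index += 1
--         continue
--
--     return True
-- ===== SOURCE B (Python) =====
-- EMPTY_CHARACTERS = frozenset((' ', '\t', '\n'))
--
-- def _check_is_buffer_empty_after(buffer, index):
--     characters = set()
--     for position in range(index + 1, len(buffer)):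
--         characters.update(buffer[position])
--     return characters <= EMPTY_CHARACTERS
-- ===== Notes on version B (the rewrite author's own statement) =====
-- stated objective: alternative
-- what changed: Instead of a while loop with a per-line helper and two early-exit scans, B collects the set of all characters occurring in the lines after index in one pass and returns a single subset test against EMPTY_CHARACTERS.
import Mathlib
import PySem

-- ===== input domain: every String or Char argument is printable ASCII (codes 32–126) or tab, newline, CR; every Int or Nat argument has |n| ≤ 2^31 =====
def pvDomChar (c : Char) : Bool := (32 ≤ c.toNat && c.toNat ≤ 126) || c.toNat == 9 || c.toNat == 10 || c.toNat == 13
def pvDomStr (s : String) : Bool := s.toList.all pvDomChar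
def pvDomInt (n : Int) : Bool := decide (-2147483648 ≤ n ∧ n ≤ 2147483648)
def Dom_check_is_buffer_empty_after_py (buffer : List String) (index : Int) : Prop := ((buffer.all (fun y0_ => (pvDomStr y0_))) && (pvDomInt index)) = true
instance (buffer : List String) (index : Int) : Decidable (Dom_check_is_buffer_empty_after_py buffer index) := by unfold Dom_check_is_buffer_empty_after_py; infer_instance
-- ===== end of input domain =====

-- B replaces the early-exit while loop with its per-line helper by one pass collecting the
-- set of characters occurring after index, followed by a single subset test (alternative
-- decomposition, not faster).

-- ===== PORT A =====
def EMPTY_CHARACTERS : PySem.Set Char := PySem.Set.ofList [' ', '\t', '\n']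

-- for character in line: if character not in EMPTY_CHARACTERS: return False / return True
def check_is_line_empty (line : String) : Bool :=
  line.toList.all (fun character => EMPTY_CHARACTERS.contains character)

-- the while loop of _check_is_buffer_empty_after; buffer[index] is PySem.List.pyGetD,
-- exact under Pre_ (every reached index is in Python's range, incl. negative wrap-around)
def bufferLoopA (buffer : List String) (bufferLength : Int) (index : Int) : Bool :=
  if _h : index < bufferLength then
    if !check_is_line_empty (PySem.List.pyGetD buffer index "") then false
    else bufferLoopA buffer bufferLength (index + 1)
  else true
termination_by (bufferLength - index).toNat
decreasing_by omega

def check_is_buffer_empty_after_py (buffer : List String) (index : Int) : Bool :=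
  bufferLoopA buffer buffer.length (index + 1)

-- ===== PORT B =====
def check_is_buffer_empty_after_py_alt (buffer : List String) (index : Int) : Bool :=
  let characters := (PySem.List.pyRange (index + 1) (buffer.length : Int) 1).foldl
    (fun s position => PySem.Set.update s (PySem.List.pyGetD buffer position "").toList)
    PySem.Set.empty
  PySem.Set.issubset characters EMPTY_CHARACTERS

-- ===== PRECONDITION & SPEC =====
-- Pre_ excludes exactly the inputs where Python A raises IndexError: index + 1 below
-- -len(buffer) (the first access buffer[index + 1] is out of range even after wrap-around).
def Pre_check_is_buffer_empty_after_py (buffer : List String) (index : Int) : Prop :=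
  -(buffer.length : Int) ≤ index + 1
instance (buffer : List String) (index : Int) : Decidable (Pre_check_is_buffer_empty_after_py buffer index) := by unfold Pre_check_is_buffer_empty_after_py; infer_instance

def pvWitness_check_is_buffer_empty_after_py : List String × Int := ([" x", "  "], 0)

def Spec_check_is_buffer_empty_after_py (buffer : List String) (index : Int) (out : Bool) : Prop := out = check_is_buffer_empty_after_py_alt buffer index
instance (buffer : List String) (index : Int) (out : Bool) : Decidable (Spec_check_is_buffer_empty_after_py buffer index out) := by unfold Spec_check_is_buffer_empty_after_py; infer_instance

-- ===== CLAIM (what is proved, stated in full; the proofs are below) =====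
def Claim_equal_check_is_buffer_empty_after_py : Prop := ∀ (buffer : List String) (index : Int), Dom_check_is_buffer_empty_after_py buffer index → Pre_check_is_buffer_empty_after_py buffer index → Spec_check_is_buffer_empty_after_py buffer index (check_is_buffer_empty_after_py buffer index)

-- ===== LEMMAS AND PROOFS =====

-- A's loop computes "every line at an index of range(i, len) is empty"
theorem bufferLoopA_eq_all (buffer : List String) (i : Int) :
    bufferLoopA buffer (buffer.length : Int) i =
      (PySem.List.pyRange i (buffer.length : Int) 1).all
        (fun j => check_is_line_empty (PySem.List.pyGetD buffer j "")) := by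
  by_cases h : i < (buffer.length : Int)
  · rw [bufferLoopA, dif_pos h, PySem.List.pyRange_one_cons h, List.all_cons,
      bufferLoopA_eq_all buffer (i + 1)]
    cases check_is_line_empty (PySem.List.pyGetD buffer i "") <;> simp
  · rw [bufferLoopA, dif_neg h, PySem.List.pyRange_one_eq_nil (by omega), List.all_nil]
termination_by (buffer.length - i).toNat
decreasing_by omega

-- membership in a fold of Set.update over a list of char lists
theorem mem_foldl_update (L : List (List Char)) (s : PySem.Set Char) (c : Char) :
    c ∈ L.foldl (fun t l => PySem.Set.update t l) s ↔ c ∈ s ∨ ∃ l ∈ L, c ∈ l := by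
  induction L generalizing s with
  | nil => simp
  | cons l L ih =>
    rw [List.foldl_cons, ih]
    have hu : ∀ (t : PySem.Set Char), c ∈ PySem.Set.update t l ↔ c ∈ t ∨ c ∈ l := by
      intro t
      unfold PySem.Set.update
      induction l generalizing t with
      | nil => simp
      | cons x xs ihx =>
        rw [List.foldl_cons, ihx, PySem.Set.mem_add]
        simp only [List.mem_cons]
        tauto
    rw [hu]
    constructor
    · rintro ((h0 | h1) | ⟨l', hl', hc⟩)
      · exact Or.inl h0
      · exact Or.inr ⟨l, List.mem_cons_self .., h1⟩
      · exact Or.inr ⟨l', List.mem_cons_of_mem _ hl', hc⟩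
    · rintro (h0 | ⟨l', hl', hc⟩)
      · exact Or.inl (Or.inl h0)
      · rcases List.mem_cons.mp hl' with rfl | hl'
        · exact Or.inl (Or.inr hc)
        · exact Or.inr ⟨l', hl', hc⟩

-- B's fold-and-subset-test equals A's "all lines empty" scan
theorem alt_eq_all (buffer : List String) (i : Int) :
    check_is_buffer_empty_after_py_alt buffer (i - 1) =
      (PySem.List.pyRange i (buffer.length : Int) 1).all
        (fun j => check_is_line_empty (PySem.List.pyGetD buffer j "")) := by
  unfold check_is_buffer_empty_after_py_alt
  have hi : i - 1 + 1 = i := by omega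
  rw [hi]
  rw [Bool.eq_iff_iff]
  have hmap : (PySem.List.pyRange i (buffer.length : Int) 1).foldl
      (fun s position => PySem.Set.update s (PySem.List.pyGetD buffer position "").toList)
      PySem.Set.empty =
      ((PySem.List.pyRange i (buffer.length : Int) 1).map
        (fun position => (PySem.List.pyGetD buffer position "").toList)).foldl
        (fun t l => PySem.Set.update t l) PySem.Set.empty := by
    rw [List.foldl_map]
  simp only [hmap, PySem.Set.issubset, List.all_eq_true, check_is_line_empty]
  constructor
  · intro h j hj c hc
    exact h c ((mem_foldl_update _ _ _).mpr
      (Or.inr ⟨(PySem.List.pyGetD buffer j "").toList, List.mem_map_of_mem hj, hc⟩))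
  · intro h c hc
    rcases (mem_foldl_update _ _ _).mp hc with h0 | ⟨l, hl, hcl⟩
    · simp [PySem.Set.empty] at h0
    · rcases List.mem_map.mp hl with ⟨j, hj, rfl⟩
      exact h j hj c hcl

-- ===== VERDICT (by name: the statement is the Claim_ definition above) =====
theorem check_is_buffer_empty_after_py_spec : Claim_equal_check_is_buffer_empty_after_py := by
  intro buffer index _hdom _hpre
  unfold Spec_check_is_buffer_empty_after_py check_is_buffer_empty_after_py
  have := alt_eq_all buffer (index + 1)
  simp only [add_sub_cancel_right] at this
  rw [this, bufferLoopA_eq_all]
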